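-- pv_equiv track=rewrite | github.com/dalab/neural_qa | neural_qa/data_helpers.py | my_parser
-- ===== SOURCE A (Python) =====
-- def my_parser(answer_string):
--     level = 0
--     matches = []
--     record = False
--     string_constructed = ""
--     for c in answer_string:
--         if c == ")":
--             if level == 2:
--                 record = False
--                 matches.append(string_constructed)
--                 string_constructed = ""
--             level -= 1
--         if record:
--             string_constructed += c
--         if c == '(':
--             level += 1
--         if level == 2:
--             record = True
--     return matches
-- ===== SOURCE B (Python) =====
-- def my_parser(answer_string):
--     matches = []
--     depth = 0
--     start = 0
--     for i, c in enumerate(answer_string):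
--         if c == '(':
--             depth += 1
--             if depth == 2:
--                 start = i + 1
--         elif c == ')':
--             if depth == 2:
--                 matches.append(answer_string[start:i])
--             depth -= 1
--     return matches
-- ===== Notes on version B (the rewrite author's own statement) =====
-- stated objective: simpler
-- what changed: Replaced the record flag and character-by-character buffer accumulation with a single depth counter that remembers the index just after an opening parenthesis taking depth 1 to 2 and emits a slice of the original string at the closing parenthesis taking depth 2 back to 1.
import Mathlib
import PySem

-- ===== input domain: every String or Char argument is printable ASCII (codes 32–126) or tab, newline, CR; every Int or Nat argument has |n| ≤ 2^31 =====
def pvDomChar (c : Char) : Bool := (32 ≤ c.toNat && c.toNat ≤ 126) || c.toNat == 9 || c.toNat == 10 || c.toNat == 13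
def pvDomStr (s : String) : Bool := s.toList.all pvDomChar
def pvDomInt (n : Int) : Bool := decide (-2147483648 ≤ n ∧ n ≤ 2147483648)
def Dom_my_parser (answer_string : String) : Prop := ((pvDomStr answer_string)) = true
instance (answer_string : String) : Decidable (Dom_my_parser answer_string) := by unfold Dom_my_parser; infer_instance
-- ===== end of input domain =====

-- B replaces A's record flag and character-by-character buffer with slice indices into the
-- original string (objective: simpler one-pass decomposition; same cost).

-- ===== PORT A =====
-- state: (level, matches, record, string_constructed)
def pvStepA (st : Int × List String × Bool × List Char) (c : Char) :
    Int × List String × Bool × List Char :=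
  let st1 :=
    if c = ')' then
      if st.1 = 2 then (st.1 - 1, st.2.1 ++ [String.ofList st.2.2.2], false, ([] : List Char))
      else (st.1 - 1, st.2.1, st.2.2.1, st.2.2.2)
    else st
  let buf := if st1.2.2.1 then st1.2.2.2 ++ [c] else st1.2.2.2
  let lvl := if c = '(' then st1.1 + 1 else st1.1
  let rcd := if lvl = 2 then true else st1.2.2.1
  (lvl, st1.2.1, rcd, buf)

def my_parser (answer_string : String) : List String :=
  (answer_string.toList.foldl pvStepA (0, [], false, [])).2.1

-- ===== PORT B =====
-- state: (depth, start, matches); full is the whole input, for slicing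
def pvStepB (full : List Char) (st : Int × Int × List String) (ic : Int × Char) :
    Int × Int × List String :=
  if ic.2 = '(' then
    if st.1 + 1 = 2 then (st.1 + 1, ic.1 + 1, st.2.2) else (st.1 + 1, st.2.1, st.2.2)
  else if ic.2 = ')' then
    if st.1 = 2 then
      (st.1 - 1, st.2.1, st.2.2 ++ [String.ofList (PySem.List.slice full (some st.2.1) (some ic.1))])
    else (st.1 - 1, st.2.1, st.2.2)
  else st

def my_parser_alt (answer_string : String) : List String :=
  ((PySem.List.enumerate answer_string.toList 0).foldl
      (pvStepB answer_string.toList) (0, 0, [])).2.2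

-- ===== PRECONDITION & SPEC =====
def Spec_my_parser (answer_string : String) (out : List String) : Prop := out = my_parser_alt answer_string
instance (answer_string : String) (out : List String) : Decidable (Spec_my_parser answer_string out) := by unfold Spec_my_parser; infer_instance

-- ===== CLAIM (what is proved, stated in full; the proofs are below) =====
def Claim_equal_my_parser : Prop := ∀ (answer_string : String), Dom_my_parser answer_string → Spec_my_parser answer_string (my_parser answer_string)

-- ===== LEMMAS AND PROOFS =====

-- appending the character at position i extends the buffer slice by one
lemma pv_take_drop_snoc (l : List Char) (j i : Nat) (c : Char) (hji : j ≤ i)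
    (hc : l[i]? = some c) :
    (l.drop j).take (i - j) ++ [c] = (l.drop j).take (i + 1 - j) := by
  have h1 : i + 1 - j = (i - j) + 1 := by omega
  rw [h1, List.take_add_one]
  have h2 : (l.drop j)[i - j]? = some c := by
    rw [List.getElem?_drop]
    have : j + (i - j) = i := by omega
    rw [this, hc]
  rw [h2]
  rfl

-- the loop invariant: A's (record, buffer) state is determined by the depth and,
-- when depth ≥ 2, the buffer is the slice of the input from `start` to the cursor.
lemma pv_loop_eq (full : List Char) : ∀ (rest : List Char) (i : Nat)
    (lvl : Int) (acc : List String) (rcd : Bool) (buf : List Char) (start : Int),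
    rest = full.drop i →
    (if 2 ≤ lvl then
        rcd = true ∧ ∃ j : Nat, start = (j : Int) ∧ j ≤ i ∧ buf = (full.drop j).take (i - j)
      else rcd = false ∧ buf = []) →
    (rest.foldl pvStepA (lvl, acc, rcd, buf)).2.1
      = ((PySem.List.enumerate rest (i : Int)).foldl (pvStepB full) (lvl, start, acc)).2.2
  | [], i, lvl, acc, rcd, buf, start, _, _ => by
      simp [PySem.List.enumerate]
  | c :: rest', i, lvl, acc, rcd, buf, start, hdrop, hinv => by
      have hlen : i < full.length := by
        by_contra h
        have : full.drop i = [] := List.drop_eq_nil_of_le (by omega)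
        rw [this] at hdrop; exact (List.cons_ne_nil _ _) hdrop
      have hci : full[i]? = some c := by
        have h0 : (full.drop i)[0]? = some c := by rw [← hdrop]; rfl
        rw [List.getElem?_drop] at h0; simpa using h0
      have hdrop' : rest' = full.drop (i + 1) := by
        have h1 : full.drop (i + 1) = (full.drop i).drop 1 := by
          rw [List.drop_drop]
        rw [h1, ← hdrop]; rfl
      rw [PySem.List.enumerate_cons, List.foldl_cons, List.foldl_cons]
      by_cases hp : c = '('
      · -- opening paren
        by_cases h2 : lvl + 1 = 2
        · -- depth 1 → 2 : B records start = i+1, A turns record on with empty buffer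
          have hlt : ¬ 2 ≤ lvl := by omega
          rw [if_neg hlt] at hinv
          obtain ⟨hr, hb⟩ := hinv
          have hA : pvStepA (lvl, acc, rcd, buf) c = (lvl + 1, acc, true, buf) := by
            simp [pvStepA, hp, hr, h2]
          have hB : pvStepB full (lvl, start, acc) ((i : Int), c)
              = (lvl + 1, (i : Int) + 1, acc) := by
            simp [pvStepB, hp, h2]
          rw [hA, hB]
          have := pv_loop_eq full rest' (i + 1) (lvl + 1) acc true buf ((i : Int) + 1)
            hdrop' (by
              rw [if_pos (by omega)]
              exact ⟨rfl, i + 1, by push_cast; ring_nf, le_refl _, by simp [hb]⟩)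
          simpa using this
        · by_cases hge : 2 ≤ lvl
          · -- already inside: buffer grows by '('
            rw [if_pos hge] at hinv
            obtain ⟨hr, j, hs, hji, hb⟩ := hinv
            have hA : pvStepA (lvl, acc, rcd, buf) c = (lvl + 1, acc, rcd, buf ++ [c]) := by
              simp [pvStepA, hp, hr, h2]
            have hB : pvStepB full (lvl, start, acc) ((i : Int), c)
                = (lvl + 1, start, acc) := by
              simp [pvStepB, hp, h2]
            rw [hA, hB]
            exact pv_loop_eq full rest' (i + 1) (lvl + 1) acc rcd (buf ++ [c]) start
              hdrop' (by
                rw [if_pos (by omega)]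
                exact ⟨hr, j, hs, by omega,
                  by rw [hb]; exact pv_take_drop_snoc full j i c hji hci⟩)
          · -- depth stays below 2
            rw [if_neg hge] at hinv
            obtain ⟨hr, hb⟩ := hinv
            have hA : pvStepA (lvl, acc, rcd, buf) c = (lvl + 1, acc, false, buf) := by
              simp [pvStepA, hp, hr, h2]
            have hB : pvStepB full (lvl, start, acc) ((i : Int), c)
                = (lvl + 1, start, acc) := by
              simp [pvStepB, hp, h2]
            rw [hA, hB]
            exact pv_loop_eq full rest' (i + 1) (lvl + 1) acc false buf start hdrop'
              (by rw [if_neg (by omega)]; exact ⟨rfl, hb⟩)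
      · by_cases hq : c = ')'
        · -- closing paren
          by_cases h2 : lvl = 2
          · -- depth 2 → 1 : both sides flush the match
            rw [if_pos (by omega)] at hinv
            obtain ⟨hr, j, hs, hji, hb⟩ := hinv
            have hA : pvStepA (lvl, acc, rcd, buf) c
                = (lvl - 1, acc ++ [String.ofList buf], false, []) := by
              simp [pvStepA, hq, h2]
            have hB : pvStepB full (lvl, start, acc) ((i : Int), c)
                = (lvl - 1, start, acc ++
                    [String.ofList (PySem.List.slice full (some start) (some (i : Int)))]) := by
              simp [pvStepB, hq, h2]
            have hslice : PySem.List.slice full (some start) (some (i : Int))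
                = (full.drop j).take (i - j) := by
              rw [hs, PySem.List.slice_natCast]
            rw [hA, hB, hslice, ← hb]
            exact pv_loop_eq full rest' (i + 1) (lvl - 1) (acc ++ [String.ofList buf]) false []
              start hdrop' (by rw [if_neg (by omega)]; exact ⟨rfl, rfl⟩)
          · by_cases hge : 2 ≤ lvl
            · -- depth ≥ 3 decreasing: buffer grows by ')'
              rw [if_pos hge] at hinv
              obtain ⟨hr, j, hs, hji, hb⟩ := hinv
              have hA : pvStepA (lvl, acc, rcd, buf) c
                  = (lvl - 1, acc, rcd, buf ++ [c]) := by
                simp [pvStepA, hq, h2, hr]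
              have hB : pvStepB full (lvl, start, acc) ((i : Int), c)
                  = (lvl - 1, start, acc) := by
                simp [pvStepB, hq, h2]
              rw [hA, hB]
              exact pv_loop_eq full rest' (i + 1) (lvl - 1) acc rcd (buf ++ [c]) start
                hdrop' (by
                  rw [if_pos (by omega)]
                  exact ⟨hr, j, hs, by omega,
                    by rw [hb]; exact pv_take_drop_snoc full j i c hji hci⟩)
            · -- depth below 2 decreasing
              rw [if_neg hge] at hinv
              obtain ⟨hr, hb⟩ := hinv
              have hl2 : ¬ (lvl - 1 = 2) := by omega
              have hA : pvStepA (lvl, acc, rcd, buf) c = (lvl - 1, acc, false, buf) := by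
                simp [pvStepA, hq, h2, hr, hl2]
              have hB : pvStepB full (lvl, start, acc) ((i : Int), c)
                  = (lvl - 1, start, acc) := by
                simp [pvStepB, hq, h2]
              rw [hA, hB]
              exact pv_loop_eq full rest' (i + 1) (lvl - 1) acc false buf start hdrop'
                (by rw [if_neg (by omega)]; exact ⟨rfl, hb⟩)
        · -- non-paren character
          by_cases hge : 2 ≤ lvl
          · rw [if_pos hge] at hinv
            obtain ⟨hr, j, hs, hji, hb⟩ := hinv
            have hA : pvStepA (lvl, acc, rcd, buf) c = (lvl, acc, rcd, buf ++ [c]) := by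
              simp [pvStepA, hq, hp, hr]
            have hB : pvStepB full (lvl, start, acc) ((i : Int), c)
                = (lvl, start, acc) := by
              simp [pvStepB, hq, hp]
            rw [hA, hB]
            exact pv_loop_eq full rest' (i + 1) lvl acc rcd (buf ++ [c]) start hdrop'
              (by
                rw [if_pos hge]
                exact ⟨hr, j, hs, by omega,
                  by rw [hb]; exact pv_take_drop_snoc full j i c hji hci⟩)
          · rw [if_neg hge] at hinv
            obtain ⟨hr, hb⟩ := hinv
            have hl2 : ¬ (lvl = 2) := by omega
            have hA : pvStepA (lvl, acc, rcd, buf) c = (lvl, acc, rcd, buf) := by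
              simp [pvStepA, hq, hp, hr, hl2]
            have hB : pvStepB full (lvl, start, acc) ((i : Int), c)
                = (lvl, start, acc) := by
              simp [pvStepB, hq, hp]
            rw [hA, hB, hr]
            exact pv_loop_eq full rest' (i + 1) lvl acc false buf start hdrop'
              (by rw [if_neg hge]; exact ⟨rfl, hb⟩)

-- ===== VERDICT (by name: the statement is the Claim_ definition above) =====
theorem my_parser_spec : Claim_equal_my_parser := by
  intro s _
  unfold Spec_my_parser my_parser my_parser_alt
  have h := pv_loop_eq s.toList s.toList 0 0 [] false [] 0 (by simp)
    (by rw [if_neg (by omega)]; exact ⟨rfl, rfl⟩)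
  simpa using h
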